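-- pv_equiv track=rewrite | github.com/LuongTanDat/VietlotFast | ai_predict.py | extract_export_csv_arg
-- ===== SOURCE A (Python) =====
-- def extract_export_csv_arg(extra_args):
--     export_csv = False
--     remaining = []
--     for raw in extra_args:
--         text = str(raw or "").strip()
--         if not text:
--             continue
--         if text == "--export-csv":
--             export_csv = True
--             continue
--         if text.startswith("--export-csv="):
--             lowered = text.split("=", 1)[1].strip().lower()
--             export_csv = lowered not in {"0", "false", "off", "no"}
--             continue
--         remaining.append(text)
--     return export_csv, remaining
-- ===== SOURCE B (Python) =====
-- FLAG = "--export-csv"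
-- PREFIX = FLAG + "="
-- FALSY = {"0", "false", "off", "no"}
--
--
-- def _is_flag(tok):
--     return tok == FLAG or tok.startswith(PREFIX)
--
--
-- def _flag_value(tok):
--     if tok == FLAG:
--         return True
--     return tok.split("=", 1)[1].strip().lower() not in FALSY
--
--
-- def extract_export_csv_arg(extra_args):
--     toks = [t for t in (str(raw or "").strip() for raw in extra_args) if t]
--     remaining = [t for t in toks if not _is_flag(t)]
--     last = next((t for t in reversed(toks) if _is_flag(t)), None)
--     return (False if last is None else _flag_value(last)), remaining
-- ===== Notes on version B (the rewrite author's own statement) =====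
-- stated objective: alternative
-- what changed: Replaces A's single stateful accumulate-as-you-go loop with a partition-then-derive decomposition: normalize tokens once, build `remaining` by filtering out flag tokens, and derive export_csv from the last flag token found by a reverse scan.
import Mathlib
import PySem

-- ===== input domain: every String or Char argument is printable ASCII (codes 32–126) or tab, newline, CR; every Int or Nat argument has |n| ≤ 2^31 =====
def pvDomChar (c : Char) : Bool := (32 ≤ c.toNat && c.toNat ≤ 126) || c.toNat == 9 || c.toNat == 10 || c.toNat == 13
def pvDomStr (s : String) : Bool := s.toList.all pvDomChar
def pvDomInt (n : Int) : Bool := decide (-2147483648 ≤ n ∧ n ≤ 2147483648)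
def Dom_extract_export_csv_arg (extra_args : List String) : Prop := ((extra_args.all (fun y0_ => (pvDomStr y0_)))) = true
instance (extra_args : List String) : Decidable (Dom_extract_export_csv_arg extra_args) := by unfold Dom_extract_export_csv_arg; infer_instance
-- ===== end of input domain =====

-- B replaces A's single stateful accumulate-as-you-go loop with a partition-then-derive
-- decomposition (filter out flags, derive export_csv from the last flag); objective: alternative.


-- ===== PORT A =====
-- A's loop: one pass keeping (export_csv, remaining) as it goes; `str(raw or "")` = raw for strings.
def pvALoop (export_csv : Bool) (xs : List String) : Bool × List String :=
  match xs with
  | [] => (export_csv, [])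
  | raw :: rest =>
    let text := PySem.Str.strip raw
    if text = "" then pvALoop export_csv rest
    else if text = "--export-csv" then pvALoop true rest
    else if PySem.Str.startswith text "--export-csv=" then
      let lowered := PySem.Str.lower (PySem.Str.strip
        ((((PySem.Str.splitMax? text "=" 1).getD [])[1]?).getD ""))
      pvALoop (!(["0", "false", "off", "no"].contains lowered)) rest
    else
      let r := pvALoop export_csv rest
      (r.1, text :: r.2)

def extract_export_csv_arg (extra_args : List String) : Bool × List String :=
  pvALoop false extra_args

-- ===== PORT B =====
def pvIsFlag (t : String) : Bool := t == "--export-csv" || PySem.Str.startswith t "--export-csv="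

def pvFlagValue (t : String) : Bool :=
  if t = "--export-csv" then true
  else !(["0", "false", "off", "no"].contains
    (PySem.Str.lower (PySem.Str.strip ((((PySem.Str.splitMax? t "=" 1).getD [])[1]?).getD ""))))

def extract_export_csv_arg_alt (extra_args : List String) : Bool × List String :=
  let toks := (extra_args.map (fun raw => PySem.Str.strip raw)).filter (fun t => !(t == ""))
  let remaining := toks.filter (fun t => !pvIsFlag t)
  let last := toks.reverse.find? (fun t => pvIsFlag t)
  ((match last with | none => false | some t => pvFlagValue t), remaining)

-- ===== PRECONDITION & SPEC =====
def Spec_extract_export_csv_arg (extra_args : List String) (out : Bool × List String) : Prop := out = extract_export_csv_arg_alt extra_args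
instance (extra_args : List String) (out : Bool × List String) : Decidable (Spec_extract_export_csv_arg extra_args out) := by unfold Spec_extract_export_csv_arg; infer_instance

-- ===== CLAIM (what is proved, stated in full; the proofs are below) =====
def Claim_equal_extract_export_csv_arg : Prop := ∀ (extra_args : List String), Dom_extract_export_csv_arg extra_args → Spec_extract_export_csv_arg extra_args (extract_export_csv_arg extra_args)

-- ===== LEMMAS AND PROOFS =====

-- A's accumulated flag state equals B's "last flag wins" reading, for every start state e.
theorem pvALoop_eq (xs : List String) : ∀ (e : Bool),
    pvALoop e xs =
      ((match ((xs.map (fun raw => PySem.Str.strip raw)).filter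
            (fun t => !(t == ""))).reverse.find? (fun t => pvIsFlag t) with
        | none => e
        | some t => pvFlagValue t),
       ((xs.map (fun raw => PySem.Str.strip raw)).filter
            (fun t => !(t == ""))).filter (fun t => !pvIsFlag t)) := by
  induction xs with
  | nil => intro e; rfl
  | cons raw rest ih =>
    intro e
    rw [pvALoop, List.map_cons, List.filter_cons]
    by_cases h0 : PySem.Str.strip raw = ""
    · rw [if_pos h0, ih e]
      simp [h0]
    · rw [if_neg h0]
      have hne : (!(PySem.Str.strip raw == "")) = true := by simp [h0]
      rw [if_pos hne, List.reverse_cons, List.filter_cons]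
      by_cases h1 : PySem.Str.strip raw = "--export-csv"
      · have hfl : pvIsFlag (PySem.Str.strip raw) = true := by simp [pvIsFlag, h1]
        rw [if_pos h1, ih true, List.find?_append, if_neg (by simp [hfl])]
        cases hf : (((rest.map (fun raw => PySem.Str.strip raw)).filter
            (fun t => !(t == ""))).reverse.find? (fun t => pvIsFlag t)) <;>
          simp only [hf, List.find?, hfl, Option.none_or, Option.some_or]
        · simp [pvFlagValue, h1]
      · rw [if_neg h1]
        by_cases h2 : PySem.Str.startswith (PySem.Str.strip raw) "--export-csv=" = true
        · have hfl : pvIsFlag (PySem.Str.strip raw) = true := by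
            unfold pvIsFlag; rw [h2, Bool.or_true]
          rw [if_pos h2, ih _, List.find?_append, if_neg (by simp [hfl])]
          cases hf : (((rest.map (fun raw => PySem.Str.strip raw)).filter
              (fun t => !(t == ""))).reverse.find? (fun t => pvIsFlag t)) <;>
            simp only [hf, List.find?, hfl, Option.none_or, Option.some_or]
          · simp [pvFlagValue, h1]
        · have hfl : pvIsFlag (PySem.Str.strip raw) = false := by
            unfold pvIsFlag
            rw [eq_false_of_ne_true h2, beq_eq_false_iff_ne.mpr h1, Bool.or_false]
          rw [if_neg h2, ih e, List.find?_append, if_pos (by simp [hfl])]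
          cases hf : (((rest.map (fun raw => PySem.Str.strip raw)).filter
              (fun t => !(t == ""))).reverse.find? (fun t => pvIsFlag t)) <;>
            simp only [hf, List.find?, hfl, Option.or_none]

-- ===== VERDICT (by name: the statement is the Claim_ definition above) =====
theorem extract_export_csv_arg_spec : Claim_equal_extract_export_csv_arg := by
  intro xs _
  unfold Spec_extract_export_csv_arg extract_export_csv_arg extract_export_csv_arg_alt
  exact pvALoop_eq xs false
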